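-- pv_equiv track=rewrite | github.com/AdamZhouSE/pythonHomework | Code/CodeRecords/2744/60693/294201.py | findInSame
-- ===== SOURCE A (Python) =====
-- def findInSame(ws:[str]):
--     # 同寄或同偶的不同字符串的连接，只有两个都是由单个相同字符组合成的才可以
--     m=len(ws)
--     res=0
--     for i in range(m-1):
--         for j in range(i+1,m):
--             if set(ws[i])==set(ws[j]) and len(set(ws[i]))==1:
--                 res+=2
--     return res
-- ===== SOURCE B (Python) =====
-- def findInSame(ws):
--     # collect the repeated character of every single-character-composed string,
--     # then count ordered pairs per group: k * (k - 1)
--     chars = [w[0] for w in ws if len(set(w)) == 1]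
--     cnt = {}
--     for c in chars:
--         cnt[c] = cnt.get(c, 0) + 1
--     return sum(k * (k - 1) for k in cnt.values())
-- ===== Notes on version B (the rewrite author's own statement) =====
-- stated objective: faster
-- what changed: Instead of comparing the character-sets of every pair of strings (O(m^2) pairs, each with a set comparison), B makes one pass collecting the repeated character of each single-character-composed string, counts occurrences per character in a dict, and returns the sum of k*(k-1) over the groups.
import Mathlib
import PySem

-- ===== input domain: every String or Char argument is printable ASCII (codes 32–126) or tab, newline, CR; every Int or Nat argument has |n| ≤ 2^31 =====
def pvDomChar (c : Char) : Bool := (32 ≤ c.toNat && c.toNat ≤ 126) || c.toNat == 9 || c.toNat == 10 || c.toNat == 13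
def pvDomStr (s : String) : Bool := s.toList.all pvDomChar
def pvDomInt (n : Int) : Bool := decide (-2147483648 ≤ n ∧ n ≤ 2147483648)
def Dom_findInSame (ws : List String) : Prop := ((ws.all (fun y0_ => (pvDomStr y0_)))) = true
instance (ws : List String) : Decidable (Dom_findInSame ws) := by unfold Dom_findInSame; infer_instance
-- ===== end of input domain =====

-- B replaces A's pairwise character-set comparisons by one grouping pass plus a per-group k*(k-1) count.

-- ===== PORT A =====
def findInSame (ws : List String) : Int :=
  let m : Int := PySem.List.len ws
  (PySem.List.pyRange 0 (m - 1) 1).foldl (fun res i =>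
    (PySem.List.pyRange (i + 1) m 1).foldl (fun res j =>
      if PySem.Set.equal (PySem.Set.ofList (PySem.List.pyGetD ws i "").toList)
           (PySem.Set.ofList (PySem.List.pyGetD ws j "").toList)
         && (PySem.Set.len (PySem.Set.ofList (PySem.List.pyGetD ws i "").toList) == 1)
      then res + 2 else res) res) 0

-- ===== PORT B =====
def findInSame_alt (ws : List String) : Int :=
  -- chars = [w[0] for w in ws if len(set(w)) == 1]
  let chars : List Char :=
    (ws.filter (fun w => PySem.Set.len (PySem.Set.ofList w.toList) == 1)).map
      (fun w => (PySem.Str.pyGet? w 0).getD 'a')  -- w[0]: the filter guarantees w nonempty, so pyGet? is some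
  -- cnt = {}; for c in chars: cnt[c] = cnt.get(c, 0) + 1
  let cnt : PySem.Dict Char Int :=
    chars.foldl (fun d c => d.insert c (d.getD c 0 + 1)) PySem.Dict.empty
  -- sum(k * (k - 1) for k in cnt.values())
  (cnt.values.map (fun k => k * (k - 1))).sum

-- ===== PRECONDITION & SPEC =====
def Spec_findInSame (ws : List String) (out : Int) : Prop := out = findInSame_alt ws
instance (ws : List String) (out : Int) : Decidable (Spec_findInSame ws out) := by unfold Spec_findInSame; infer_instance

-- ===== CLAIM (what is proved, stated in full; the proofs are below) =====
def Claim_equal_findInSame : Prop := ∀ (ws : List String), Dom_findInSame ws → Spec_findInSame ws (findInSame ws)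

-- ===== LEMMAS AND PROOFS =====

-- the condition of A's inner if, as a predicate on the two strings
def condA (w v : String) : Bool :=
  PySem.Set.equal (PySem.Set.ofList w.toList) (PySem.Set.ofList v.toList)
    && (PySem.Set.len (PySem.Set.ofList w.toList) == 1)

-- the repeated character of a single-character-composed string, if any
def key? (w : String) : Option Char :=
  match PySem.Set.ofList w.toList with
  | [c] => some c
  | _ => none

-- Σ_i #{j > i | condA ws[i] ws[j]}, by recursion on the list (A's double loop, re-shaped)
def tailPairs (ws : List String) : Int :=
  match ws with
  | [] => 0
  | w :: t => (t.countP (condA w) : Int) + tailPairs t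

-- the same quantity on the collected characters
def charPairs (cs : List Char) : Int :=
  match cs with
  | [] => 0
  | c :: t => (t.count c : Int) + charPairs t

theorem sum_map_update (d : List Char) (hd : d.Nodup) (c0 : Char) (h0 : c0 ∈ d)
    (f g : Char → Int) (hfg : ∀ c ∈ d, c ≠ c0 → f c = g c) :
    (d.map f).sum = (d.map g).sum + (f c0 - g c0) := by
  induction d with
  | nil => simp at h0
  | cons x d' ih =>
    rcases List.mem_cons.mp h0 with hx | hx
    · subst hx
      have hmaps : d'.map f = d'.map g := by
        apply List.map_congr_left
        intro c hc
        exact hfg c (List.mem_cons_of_mem _ hc) (fun he => (List.nodup_cons.mp hd).1 (he ▸ hc))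
      simp [hmaps]; ring
    · have hx0 : x ≠ c0 := fun he => (List.nodup_cons.mp hd).1 (he ▸ hx)
      have := ih (List.nodup_cons.mp hd).2 hx (fun c hc hne => hfg c (List.mem_cons_of_mem _ hc) hne)
      simp only [List.map_cons, List.sum_cons, this, hfg x (List.mem_cons_self) hx0]
      ring

-- the grouping identity: Σ over the distinct characters of count*(count-1) = 2 * Σ pairs
theorem stepMath (cs d : List Char) (hd : d.Nodup) (hsub : ∀ c ∈ cs, c ∈ d) :
    (d.map (fun c => (cs.count c : Int) * ((cs.count c : Int) - 1))).sum = 2 * charPairs cs := by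
  induction cs with
  | nil => simp [charPairs]
  | cons c0 t ih =>
    have h0 : c0 ∈ d := hsub c0 List.mem_cons_self
    have hsub' : ∀ c ∈ t, c ∈ d := fun c hc => hsub c (List.mem_cons_of_mem _ hc)
    rw [sum_map_update d hd c0 h0 _ (fun c => (t.count c : Int) * ((t.count c : Int) - 1))
      (by
        intro c _ hne
        rw [List.count_cons_of_ne (by exact fun he => hne he.symm)])]
    rw [ih hsub']
    simp [charPairs, List.count_cons_self]
    ring

-- B = 2 * charPairs of the collected characters
theorem stepB (ws : List String) :
    findInSame_alt ws = 2 * charPairs ((ws.filter (fun w => PySem.Set.len (PySem.Set.ofList w.toList) == 1)).map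
      (fun w => (PySem.Str.pyGet? w 0).getD 'a')) := by
  set cs := (ws.filter (fun w => PySem.Set.len (PySem.Set.ofList w.toList) == 1)).map
      (fun w => (PySem.Str.pyGet? w 0).getD 'a')
  -- the dict loop is collections-free counting: definitionally Dict.counter
  have h1 : findInSame_alt ws = ((PySem.Dict.counter cs).values.map (fun k => k * (k - 1))).sum := rfl
  rw [h1]
  have hv : (PySem.Dict.counter cs).values
      = (PySem.Set.ofList cs).map (fun k => (cs.count k : Int)) := by
    simp [PySem.Dict.values, PySem.Dict.items_counter]
  rw [hv, List.map_map]
  rw [← stepMath cs (PySem.Set.ofList cs) (PySem.Set.nodup_ofList cs)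
    (fun c hc => (PySem.Set.mem_ofList cs c).mpr hc)]
  rfl

theorem key?_eq_some_iff (w : String) (c : Char) :
    key? w = some c ↔ PySem.Set.ofList w.toList = [c] := by
  unfold key?
  split <;> simp_all

theorem cond1_iff_key (w : String) :
    (PySem.Set.len (PySem.Set.ofList w.toList) == 1) = true ↔ ∃ c, key? w = some c := by
  simp only [PySem.Set.len, beq_iff_eq]
  constructor
  · intro h
    have h1 : (PySem.Set.ofList w.toList).length = 1 := by exact_mod_cast h
    rcases List.length_eq_one_iff.mp h1 with ⟨c, hc⟩
    exact ⟨c, (key?_eq_some_iff w c).mpr hc⟩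
  · rintro ⟨c, hc⟩
    rw [(key?_eq_some_iff w c).mp hc]
    simp

theorem equal_singleton (c : Char) (t : List Char) (ht : t.Nodup) :
    PySem.Set.equal [c] t = true ↔ t = [c] := by
  constructor
  · intro h
    simp only [PySem.Set.equal, PySem.Set.issubset, PySem.Set.contains, Bool.and_eq_true,
      List.all_eq_true, List.contains_eq_mem, decide_eq_true_eq] at h
    obtain ⟨h1, h2⟩ := h
    have hc : c ∈ t := by simpa using h1 c List.mem_cons_self
    have hall : ∀ x ∈ t, x = c := by intro x hx; simpa using h2 x hx
    cases t with
    | nil => simp at hc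
    | cons y t' =>
      have hy : y = c := hall y List.mem_cons_self
      cases t' with
      | nil => simp [hy]
      | cons z t'' =>
        exfalso
        have hz : z = c := hall z (List.mem_cons_of_mem _ List.mem_cons_self)
        rw [hy, hz] at ht
        simp at ht
  · rintro rfl
    simp [PySem.Set.equal, PySem.Set.issubset, PySem.Set.contains]

theorem condA_iff (w v : String) :
    condA w v = true ↔ ∃ c, key? w = some c ∧ key? v = some c := by
  unfold condA
  rw [Bool.and_eq_true]
  constructor
  · rintro ⟨heq, hlen⟩
    rcases (cond1_iff_key w).mp hlen with ⟨c, hc⟩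
    refine ⟨c, hc, ?_⟩
    have hw := (key?_eq_some_iff w c).mp hc
    rw [hw] at heq
    have := (equal_singleton c _ (PySem.Set.nodup_ofList v.toList)).mp heq
    exact (key?_eq_some_iff v c).mpr this
  · rintro ⟨c, hw, hv⟩
    have hw' := (key?_eq_some_iff w c).mp hw
    have hv' := (key?_eq_some_iff v c).mp hv
    refine ⟨?_, (cond1_iff_key w).mpr ⟨c, hw⟩⟩
    rw [hw', hv']
    exact (equal_singleton c _ (by simp)).mpr rfl

theorem headval (w : String) (c : Char) (h : PySem.Set.ofList w.toList = [c]) :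
    (PySem.Str.pyGet? w 0).getD 'a' = c := by
  cases hl : w.toList with
  | nil => rw [hl] at h; simp [PySem.Set.ofList, PySem.Set.empty] at h
  | cons x r =>
    have hx : x ∈ PySem.Set.ofList w.toList := by
      rw [PySem.Set.mem_ofList, hl]; exact List.mem_cons_self
    rw [h] at hx
    simp only [List.mem_singleton] at hx
    simp [PySem.Str.pyGet?, PySem.Chars.pyGet?, PySem.List.pyGet?, PySem.List.pyIdx?, hl, hx]

-- A's tail sums = B's per-character pairs
theorem stepLink (ws : List String) :
    tailPairs ws = charPairs ((ws.filter (fun w => PySem.Set.len (PySem.Set.ofList w.toList) == 1)).map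
      (fun w => (PySem.Str.pyGet? w 0).getD 'a')) := by
  induction ws with
  | nil => rfl
  | cons w t ih =>
    simp only [tailPairs, List.filter_cons]
    by_cases hk : ∃ c, key? w = some c
    · rcases hk with ⟨c, hc⟩
      rw [if_pos ((cond1_iff_key w).mpr ⟨c, hc⟩)]
      simp only [List.map_cons, charPairs]
      rw [headval w c ((key?_eq_some_iff w c).mp hc), ih]
      congr 1
      rw [List.count_eq_countP, List.countP_map, List.countP_filter]
      norm_cast
      apply List.countP_congr
      intro v _
      simp only [Function.comp]
      rw [Bool.and_eq_true, condA_iff]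
      constructor
      · rintro ⟨c', hw', hv'⟩
        have : c' = c := by rw [hc] at hw'; exact (Option.some_inj.mp hw').symm
        subst this
        refine ⟨by rw [headval v c' ((key?_eq_some_iff v c').mp hv')]; simp, (cond1_iff_key v).mpr ⟨c', hv'⟩⟩
      · rintro ⟨hhead, hlen⟩
        rcases (cond1_iff_key v).mp hlen with ⟨c', hv'⟩
        have : c' = c := by
          have := headval v c' ((key?_eq_some_iff v c').mp hv')
          simp only [beq_iff_eq] at hhead
          rw [this] at hhead; exact hhead
        exact ⟨c, hc, this ▸ hv'⟩
    · rw [if_neg (fun h => hk ((cond1_iff_key w).mp h))]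
      rw [ih]
      have hz : t.countP (condA w) = 0 := by
        apply List.countP_eq_zero.mpr
        intro v _ hcond
        exact hk (let ⟨c, hw, _⟩ := (condA_iff w v).mp hcond; ⟨c, hw⟩)
      simp [hz]

theorem foldl_if2 (p : String → Bool) (l : List String) (a : Int) :
    l.foldl (fun acc x => if p x then acc + 2 else acc) a = a + 2 * (l.countP p : Int) := by
  induction l generalizing a with
  | nil => simp
  | cons x t ih =>
    simp only [List.foldl_cons, List.countP_cons]
    by_cases h : p x = true
    · simp [h, ih]; ring
    · simp [h, ih]

-- A's double loop, as a sum over the outer index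
theorem stepA1 (ws : List String) :
    findInSame ws =
      ((List.range (ws.length - 1)).map
        (fun k => 2 * (((ws.drop (k + 1)).countP (condA (ws.getD k ""))) : Int))).sum := by
  have h1 : findInSame ws =
      (PySem.List.pyRange 0 ((ws.length : Int) - 1) 1).foldl (fun res i =>
        res + 2 * (((ws.drop (i + 1).toNat).countP (condA (PySem.List.pyGetD ws i ""))) : Int)) 0 := by
    unfold findInSame
    simp only [PySem.List.len]
    apply PySem.List.foldl_congr_mem
    intro res i hi
    have h0i : 0 ≤ i := (PySem.List.mem_pyRange_one.mp hi).1
    have h2 := PySem.List.foldl_pyRange_pyGetD' ws ""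
      (fun acc v => if condA (PySem.List.pyGetD ws i "") v then acc + 2 else acc) res
      (show (0:Int) ≤ i + 1 by omega)
    rw [foldl_if2] at h2
    exact h2
  rw [h1, PySem.List.foldl_add, PySem.List.pyRange_one, List.map_map]
  have hlen : (((ws.length : Int) - 1) - 0).toNat = ws.length - 1 := by omega
  rw [hlen, zero_add]
  refine congrArg List.sum ?_
  apply List.map_congr_left
  intro k hk
  simp only [Function.comp, zero_add, PySem.List.pyGetD_natCast]
  have hnk : ((k : Int) + 1).toNat = k + 1 := by omega
  rw [hnk]

-- the outer sum collapses to the tail recursion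
theorem stepA2 (ws : List String) :
    ((List.range (ws.length - 1)).map
        (fun k => 2 * (((ws.drop (k + 1)).countP (condA (ws.getD k ""))) : Int))).sum
      = 2 * tailPairs ws := by
  induction ws with
  | nil => simp [tailPairs]
  | cons w t ih =>
    simp only [List.length_cons, Nat.add_sub_cancel]
    cases t with
    | nil => simp [tailPairs]
    | cons v t' =>
      rw [show (v :: t').length = t'.length + 1 from rfl, List.range_succ_eq_map,
        List.map_cons, List.sum_cons, List.map_map]
      have hmap : (List.range t'.length).map
          ((fun k => 2 * ((((w :: v :: t').drop (k + 1)).countP (condA ((w :: v :: t').getD k ""))) : Int)) ∘ Nat.succ)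
          = (List.range ((v :: t').length - 1)).map
          (fun k => 2 * ((((v :: t').drop (k + 1)).countP (condA ((v :: t').getD k ""))) : Int)) := by
        simp only [List.length_cons, Nat.add_sub_cancel]
        apply List.map_congr_left
        intro k hk
        rfl
      rw [hmap, ih]
      simp only [tailPairs, List.drop_succ_cons, List.drop_zero, List.getD_cons_zero]
      ring

-- ===== VERDICT (by name: the statement is the Claim_ definition above) =====
theorem findInSame_spec : Claim_equal_findInSame := by
  intro ws _
  unfold Spec_findInSame
  rw [stepA1, stepA2, stepLink, stepB]
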